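-- pv_equiv track=rewrite | github.com/DanielPatinoVieito/Hurricanes_Analysis | script.py | construct_clasification_per_mortality
-- ===== SOURCE A (Python) =====
-- def construct_clasification_per_mortality(hurricanes_dictionary):
--   mortality_scale = {0: 0, 1: 100, 2: 500, 3: 1000, 4: 10000}
--   mortality_dictionary = {1: [], 2: [], 3: [], 4: [], 5:[]}
--   for name, values in hurricanes_dictionary.items():
--     if values["Deaths"] <= mortality_scale[1]:
--       mortality_dictionary[1].append(values)
--     elif values["Deaths"] > mortality_scale[1] and values["Deaths"] <= mortality_scale[2]:
--       mortality_dictionary[2].append(values)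
--     elif values["Deaths"] > mortality_scale[2] and values["Deaths"] <= mortality_scale[3]:
--       mortality_dictionary[3].append(values)
--     elif values["Deaths"] > mortality_scale[3] and values["Deaths"] <= mortality_scale[4]:
--       mortality_dictionary[4].append(values)
--     elif values["Deaths"] > mortality_scale[4]:
--       mortality_dictionary[5].append(values)
--   return mortality_dictionary
-- ===== SOURCE B (Python) =====
-- def _bisect_left(bounds, x):
--     # stdlib bisect.bisect_left, written out because this module imports nothing
--     lo, hi = 0, len(bounds)
--     while lo < hi:
--         mid = (lo + hi) // 2
--         if bounds[mid] < x:
--             lo = mid + 1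
--         else:
--             hi = mid
--     return lo
--
-- def construct_clasification_per_mortality(hurricanes_dictionary):
--     bounds = [100, 500, 1000, 10000]
--     mortality_dictionary = {k: [] for k in range(1, 6)}
--     for values in hurricanes_dictionary.values():
--         mortality_dictionary[_bisect_left(bounds, values["Deaths"]) + 1].append(values)
--     return mortality_dictionary
-- ===== Notes on version B (the rewrite author's own statement) =====
-- stated objective: alternative
-- what changed: Replaces A's five-way if/elif comparison chain (and the mortality_scale lookup dict) with a hand-written bisect_left binary search into one sorted boundary table [100, 500, 1000, 10000]; the bucket is bisect_left(bounds, deaths)+1.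
-- outside the precondition, e.g. on construct_clasification_per_mortality({'x': {}}): A raises KeyError, B raises KeyError
import Mathlib
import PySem

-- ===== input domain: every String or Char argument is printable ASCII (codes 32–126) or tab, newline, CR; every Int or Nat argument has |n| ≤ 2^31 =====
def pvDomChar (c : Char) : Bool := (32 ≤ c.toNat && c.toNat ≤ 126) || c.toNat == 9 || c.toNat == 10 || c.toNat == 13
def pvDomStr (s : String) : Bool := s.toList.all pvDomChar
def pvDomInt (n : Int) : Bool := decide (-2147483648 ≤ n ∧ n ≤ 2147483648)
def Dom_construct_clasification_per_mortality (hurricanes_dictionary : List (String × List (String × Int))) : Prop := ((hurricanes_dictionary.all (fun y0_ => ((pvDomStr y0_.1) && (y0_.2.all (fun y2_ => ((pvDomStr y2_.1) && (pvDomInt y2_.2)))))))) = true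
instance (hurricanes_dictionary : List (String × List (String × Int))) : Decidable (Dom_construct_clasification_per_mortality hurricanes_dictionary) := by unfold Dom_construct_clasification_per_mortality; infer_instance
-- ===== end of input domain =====

-- B replaces A's five-way if/elif comparison chain by a binary search (bisect_left) into a
-- sorted boundary table [100, 500, 1000, 10000]; objective: alternative (table-driven, extensible).


-- ===== PORT A =====
-- A's loop body: look up values["Deaths"], walk the if/elif chain, append to the chosen bucket.
def pvStepA (mortality_scale : PySem.Dict Int Int)
    (md : PySem.Dict Int (List (List (String × Int))))
    (p : String × List (String × Int)) : PySem.Dict Int (List (List (String × Int))) :=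
  let values := p.2
  match (PySem.Dict.mk values).get? "Deaths" with
  | none => md      -- Python raises KeyError here; such inputs are outside Pre_
  | some deaths =>
    if deaths ≤ mortality_scale.getD 1 0 then
      md.modify 1 [] (fun l => l ++ [values])
    else if deaths > mortality_scale.getD 1 0 ∧ deaths ≤ mortality_scale.getD 2 0 then
      md.modify 2 [] (fun l => l ++ [values])
    else if deaths > mortality_scale.getD 2 0 ∧ deaths ≤ mortality_scale.getD 3 0 then
      md.modify 3 [] (fun l => l ++ [values])
    else if deaths > mortality_scale.getD 3 0 ∧ deaths ≤ mortality_scale.getD 4 0 then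
      md.modify 4 [] (fun l => l ++ [values])
    else if deaths > mortality_scale.getD 4 0 then
      md.modify 5 [] (fun l => l ++ [values])
    else md

def construct_clasification_per_mortality (hurricanes_dictionary : List (String × List (String × Int))) : List (Int × List (List (String × Int))) :=
  let mortality_scale : PySem.Dict Int Int := PySem.Dict.mk [(0, 0), (1, 100), (2, 500), (3, 1000), (4, 10000)]
  let mortality_dictionary : PySem.Dict Int (List (List (String × Int))) :=
    PySem.Dict.mk [(1, []), (2, []), (3, []), (4, []), (5, [])]
  (hurricanes_dictionary.foldl (pvStepA mortality_scale) mortality_dictionary).items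

-- ===== PORT B =====
-- Source B's hand-written _bisect_left loop (bisect.bisect_left), ported step for step.
def pvBisectLeftGo (bounds : List Int) (x : Int) (lo hi : Nat) : Nat :=
  if h : lo < hi then
    let mid := (lo + hi) / 2
    if PySem.List.pyGetD bounds (Int.ofNat mid) 0 < x then
      pvBisectLeftGo bounds x (mid + 1) hi
    else
      pvBisectLeftGo bounds x lo mid
  else lo
termination_by hi - lo
decreasing_by
  · omega
  · omega

def pvBisectLeft (bounds : List Int) (x : Int) : Nat :=
  pvBisectLeftGo bounds x 0 bounds.length

-- Source B's loop body: append values to bucket _bisect_left(bounds, values["Deaths"]) + 1.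
def pvStepB (bounds : List Int)
    (md : PySem.Dict Int (List (List (String × Int))))
    (p : String × List (String × Int)) : PySem.Dict Int (List (List (String × Int))) :=
  let values := p.2
  match (PySem.Dict.mk values).get? "Deaths" with
  | none => md      -- Python raises KeyError here; such inputs are outside Pre_
  | some deaths =>
    md.modify ((pvBisectLeft bounds deaths : Int) + 1) [] (fun l => l ++ [values])

def construct_clasification_per_mortality_alt (hurricanes_dictionary : List (String × List (String × Int))) : List (Int × List (List (String × Int))) :=
  let bounds : List Int := [100, 500, 1000, 10000]
  let mortality_dictionary : PySem.Dict Int (List (List (String × Int))) :=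
    PySem.Dict.mk ((PySem.List.pyRange 1 6 1).map (fun k => (k, [])))
  (hurricanes_dictionary.foldl (pvStepB bounds) mortality_dictionary).items

-- ===== PRECONDITION & SPEC =====
-- Pre_ excludes entries lacking a "Deaths" key (A raises KeyError there) and association lists
-- with a duplicate hurricane name or a duplicate key inside a value — a Python dict cannot
-- represent duplicates, so those assoc lists are outside the dict convention's domain.
def Pre_construct_clasification_per_mortality (hurricanes_dictionary : List (String × List (String × Int))) : Prop :=
  (hurricanes_dictionary.map Prod.fst).Nodup ∧
  ∀ p ∈ hurricanes_dictionary, (p.2.map Prod.fst).Nodup ∧ "Deaths" ∈ p.2.map Prod.fst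
instance (hurricanes_dictionary : List (String × List (String × Int))) : Decidable (Pre_construct_clasification_per_mortality hurricanes_dictionary) := by unfold Pre_construct_clasification_per_mortality; infer_instance

def pvWitness_construct_clasification_per_mortality : (List (String × List (String × Int))) :=
  [("Camille", [("Deaths", 259)]), ("Cuba I", [("Deaths", 3103)])]

def Spec_construct_clasification_per_mortality (hurricanes_dictionary : List (String × List (String × Int))) (out : List (Int × List (List (String × Int)))) : Prop := out = construct_clasification_per_mortality_alt hurricanes_dictionary
instance (hurricanes_dictionary : List (String × List (String × Int))) (out : List (Int × List (List (String × Int)))) : Decidable (Spec_construct_clasification_per_mortality hurricanes_dictionary out) := by unfold Spec_construct_clasification_per_mortality; infer_instance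

-- ===== CLAIM (what is proved, stated in full; the proofs are below) =====
def Claim_equal_construct_clasification_per_mortality : Prop := ∀ (hurricanes_dictionary : List (String × List (String × Int))), Dom_construct_clasification_per_mortality hurricanes_dictionary → Pre_construct_clasification_per_mortality hurricanes_dictionary → Spec_construct_clasification_per_mortality hurricanes_dictionary (construct_clasification_per_mortality hurricanes_dictionary)

-- ===== LEMMAS AND PROOFS =====

-- Evaluating Source B's binary search on the concrete 4-element boundary table.
lemma pvBisectLeft_bounds_eval (d : Int) :
    pvBisectLeft [100, 500, 1000, 10000] d =
      if d ≤ 100 then 0 else if d ≤ 500 then 1 else if d ≤ 1000 then 2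
      else if d ≤ 10000 then 3 else 4 := by
  unfold pvBisectLeft
  simp [pvBisectLeftGo, PySem.List.pyGetD_ofNat']
  split_ifs <;> omega

-- The two loop bodies agree on every state and every entry.
lemma step_eq (md : PySem.Dict Int (List (List (String × Int))))
    (p : String × List (String × Int)) :
    pvStepA (PySem.Dict.mk [(0, 0), (1, 100), (2, 500), (3, 1000), (4, 10000)]) md p =
    pvStepB [100, 500, 1000, 10000] md p := by
  unfold pvStepA pvStepB
  cases h : (PySem.Dict.mk p.2).get? "Deaths" with
  | none => simp only [h]
  | some deaths =>
    simp only [h, pvBisectLeft_bounds_eval]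
    have e1 : (PySem.Dict.mk [((0:Int),(0:Int)),(1,100),(2,500),(3,1000),(4,10000)]).getD 1 0 = 100 := by decide
    have e2 : (PySem.Dict.mk [((0:Int),(0:Int)),(1,100),(2,500),(3,1000),(4,10000)]).getD 2 0 = 500 := by decide
    have e3 : (PySem.Dict.mk [((0:Int),(0:Int)),(1,100),(2,500),(3,1000),(4,10000)]).getD 3 0 = 1000 := by decide
    have e4 : (PySem.Dict.mk [((0:Int),(0:Int)),(1,100),(2,500),(3,1000),(4,10000)]).getD 4 0 = 10000 := by decide
    rw [e1, e2, e3, e4]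
    split_ifs <;> first | (exfalso; omega) | norm_num

theorem construct_clasification_per_mortality_spec_aux (hurricanes_dictionary : List (String × List (String × Int))) :
    construct_clasification_per_mortality hurricanes_dictionary =
    construct_clasification_per_mortality_alt hurricanes_dictionary := by
  have hstep : pvStepA (PySem.Dict.mk [(0, 0), (1, 100), (2, 500), (3, 1000), (4, 10000)]) =
      pvStepB [100, 500, 1000, 10000] := by
    funext md p; exact step_eq md p
  show (hurricanes_dictionary.foldl (pvStepA (PySem.Dict.mk [(0, 0), (1, 100), (2, 500), (3, 1000), (4, 10000)])) (PySem.Dict.mk [(1, []), (2, []), (3, []), (4, []), (5, [])])).items = _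
  rw [hstep]
  rfl

-- ===== VERDICT (by name: the statement is the Claim_ definition above) =====
theorem construct_clasification_per_mortality_spec : Claim_equal_construct_clasification_per_mortality := by
  intro hd _ _
  exact construct_clasification_per_mortality_spec_aux hd
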